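-- pv_equiv track=rewrite | github.com/yashjaiswal1/CTCI-DSA | ds/competitions/kickstart-roundB3.py | ConsecutivePrimes
-- ===== SOURCE A (Python) =====
-- import math
--
-- def isPrimeNumber(num):
--     if num == 2:
--         return True
--     if ((num % 2 == 0) or (num < 2)):
--         return False
--     else:
--         i = 3
--         while(num >= (i ** 2)):
--             if num % i == 0:
--                 return False
--             i += 2
--         return True
--
-- def ConsecutivePrimes(z):
--     approximation = int(math.sqrt(z))
--     primes = []
--     max = -1
--     for i in range(approximation - 50, approximation + 50):
--         if i > 1 and isPrimeNumber(i):
--             primes.append(i)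
--
--     for i in range(len(primes) - 1):
--         current_product = primes[i] * primes[i+1]
--
--         if current_product > max and current_product <= z:
--             max = current_product
--     return max
-- ===== SOURCE B (Python) =====
-- import math
--
-- def ConsecutivePrimes(z):
--     approximation = int(math.sqrt(z))
--     lo = max(approximation - 50, 2)
--     hi = approximation + 50
--     if hi <= lo:
--         return -1
--     # segmented sieve of Eratosthenes over the window [lo, hi)
--     flags = [True] * (hi - lo)
--     d = 2
--     while d * d < hi:
--         start = max(d * d, -(-lo // d) * d)
--         for m in range(start, hi, d):
--             flags[m - lo] = False
--         d += 1
--     primes = [lo + k for k in range(hi - lo) if flags[k]]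
--     # adjacent-prime products are increasing, so scan pairs from the top
--     # and return the first product that fits under z
--     for i in range(len(primes) - 1, 0, -1):
--         p = primes[i - 1] * primes[i]
--         if p <= z:
--             return p
--     return -1
-- ===== Notes on version B (the rewrite author's own statement) =====
-- stated objective: alternative
-- what changed: B replaces A's per-number trial-division primality test with a segmented sieve of Eratosthenes over the window, and replaces A's forward max-scan over all adjacent-prime products with a backward early-exit scan that returns the first (i.e. largest, since the products are increasing) product not exceeding z.
-- outside the precondition, e.g. on ConsecutivePrimes(-1): A raises ValueError, B raises ValueError
import Mathlib
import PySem

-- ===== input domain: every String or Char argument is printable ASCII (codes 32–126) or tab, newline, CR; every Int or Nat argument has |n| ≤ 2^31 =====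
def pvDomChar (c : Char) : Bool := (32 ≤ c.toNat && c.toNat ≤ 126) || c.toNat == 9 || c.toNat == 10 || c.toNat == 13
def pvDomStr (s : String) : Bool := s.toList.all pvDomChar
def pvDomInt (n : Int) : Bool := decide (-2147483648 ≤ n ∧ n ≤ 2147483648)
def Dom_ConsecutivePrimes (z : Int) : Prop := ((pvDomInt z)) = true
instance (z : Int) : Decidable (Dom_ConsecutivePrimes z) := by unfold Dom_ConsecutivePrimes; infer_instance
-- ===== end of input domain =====

-- B replaces A's per-number trial division by a segmented sieve of Eratosthenes over the
-- window and A's forward max-scan over all adjacent-prime products by a backward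
-- early-exit scan (the products are increasing); objective: alternative.

-- ===== PORT A =====
-- termination measure lemma for the trial-division loop (cited by isPrimeLoop's decreasing_by)
theorem primeLoop_decr (num i : Int) (h : i * i ≤ num) :
    (num + 2 - (i + 2)).toNat < (num + 2 - i).toNat := by
  have h1 : i ≤ num + 1 := by
    by_cases hp : 1 ≤ i
    · exact le_trans (le_mul_of_one_le_left (by linarith) hp) (by linarith)
    · have h0 : 0 ≤ i * i := mul_self_nonneg i
      linarith
  exact (Int.toNat_lt_toNat (by linarith)).2 (by linarith)

-- the trial-division while loop of isPrimeNumber (i = 3, 5, 7, … while num >= i**2)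
def isPrimeLoop (num i : Int) : Bool :=
  if h : i * i ≤ num then
    if PySem.Int.mod num i == 0 then false else isPrimeLoop num (i + 2)
  else true
termination_by (num + 2 - i).toNat
decreasing_by exact primeLoop_decr num i h

def isPrimeNumber (num : Int) : Bool :=
  if num == 2 then true
  else if PySem.Int.mod num 2 == 0 || num < 2 then false
  else isPrimeLoop num 3

-- int(math.sqrt(z)) is ported as Int.sqrt z: for 0 ≤ z ≤ 2^31 (Dom ∩ Pre_) CPython's
-- int(math.sqrt(z)) equals math.isqrt(z) = Int.sqrt z (checked exhaustively near every square).
def ConsecutivePrimes (z : Int) : Int :=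
  let approximation : Int := Int.sqrt z
  let primes : List Int :=
    (PySem.List.pyRange (approximation - 50) (approximation + 50) 1).foldl
      (fun acc i => if decide (1 < i) && isPrimeNumber i then acc ++ [i] else acc) []
  (PySem.List.pyRange 0 ((primes.length : Int) - 1) 1).foldl
    (fun m i =>
      let current_product := PySem.List.pyGetD primes i 0 * PySem.List.pyGetD primes (i + 1) 0
      if m < current_product ∧ current_product ≤ z then current_product else m) (-1)

-- ===== PORT B =====
-- termination measure lemma for the sieve's while loop (cited by sieveLoop's decreasing_by)
theorem sieveLoop_decr (hi d : Int) (h : d * d < hi) :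
    (hi - (d + 1)).toNat < (hi - d).toNat := by
  have h2 : d ≤ d * d := by
    by_cases hp : 1 ≤ d
    · exact le_mul_of_one_le_left (by linarith) hp
    · have h0 : 0 ≤ d * d := mul_self_nonneg d
      linarith
  exact (Int.toNat_lt_toNat (by linarith)).2 (by linarith)

-- the inner 'for m in range(start, hi, d)' marking pass
def markMultiples (lo hi d : Int) (flags : List Bool) : List Bool :=
  (PySem.List.pyRange (max (d * d) (-(PySem.Int.floordiv (-lo) d) * d)) hi d).foldl
    (fun a m => PySem.List.pySetD a (m - lo) false) flags

-- the 'while d * d < hi' sieve loop: cross out every in-window multiple m of d with d*d <= m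
def sieveLoop (lo hi d : Int) (flags : List Bool) : List Bool :=
  if h : d * d < hi then
    sieveLoop lo hi (d + 1) (markMultiples lo hi d flags)
  else flags
termination_by (hi - d).toNat
decreasing_by exact sieveLoop_decr hi d h

-- the backward 'for i in range(len(primes)-1, 0, -1)' loop with early return
def backScan (z : Int) (primes : List Int) : Nat → Int
  | 0 => -1
  | Nat.succ j =>
    let p := PySem.List.pyGetD primes (j : Int) 0 * PySem.List.pyGetD primes ((j : Int) + 1) 0
    if p ≤ z then p else backScan z primes j

def ConsecutivePrimes_alt (z : Int) : Int :=
  let approximation : Int := Int.sqrt z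
  let lo : Int := max (approximation - 50) 2
  let hi : Int := approximation + 50
  let flags : List Bool := sieveLoop lo hi 2 (List.replicate (hi - lo).toNat true)
  let primes : List Int :=
    ((PySem.List.pyRange 0 (hi - lo) 1).filter
      (fun k => PySem.List.pyGetD flags k false)).map (fun k => lo + k)
  backScan z primes (primes.length - 1)

-- ===== PRECONDITION & SPEC =====
-- Pre_ excludes z < 0, on which Python's math.sqrt(z) raises ValueError.
def Pre_ConsecutivePrimes (z : Int) : Prop := 0 ≤ z
instance (z : Int) : Decidable (Pre_ConsecutivePrimes z) := by unfold Pre_ConsecutivePrimes; infer_instance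
def pvWitness_ConsecutivePrimes : Int := 100

def Spec_ConsecutivePrimes (z : Int) (out : Int) : Prop := out = ConsecutivePrimes_alt z
instance (z : Int) (out : Int) : Decidable (Spec_ConsecutivePrimes z out) := by unfold Spec_ConsecutivePrimes; infer_instance

-- ===== CLAIM (what is proved, stated in full; the proofs are below) =====
def Claim_equal_ConsecutivePrimes : Prop := ∀ (z : Int), Dom_ConsecutivePrimes z → Pre_ConsecutivePrimes z → Spec_ConsecutivePrimes z (ConsecutivePrimes z)

-- ===== LEMMAS AND PROOFS =====

-- the common core both programs compute: running max over products of adjacent elements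
def pairFold (z : Int) : List Int → Int → Int
  | x :: y :: rest, m => pairFold z (y :: rest) (if m < x * y ∧ x * y ≤ z then x * y else m)
  | _, m => m

-- A's index loop, re-indexed over Nat
theorem foldNat_eq_pairFold (z : Int) (xs : List Int) (m : Int) :
    (List.range (xs.length - 1)).foldl
      (fun m k =>
        let cp := xs.getD k 0 * xs.getD (k + 1) 0
        if m < cp ∧ cp ≤ z then cp else m) m = pairFold z xs m := by
  induction xs generalizing m with
  | nil => simp [pairFold]
  | cons x xs ih =>
    cases xs with
    | nil => simp [pairFold]
    | cons y rest =>
      have hlen : (x :: y :: rest).length - 1 = ((y :: rest).length - 1) + 1 := by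
        simp
      rw [hlen, List.range_succ_eq_map, List.foldl_cons, List.foldl_map]
      rw [PySem.List.foldl_congr_mem _ _
        (fun m k =>
          let cp := (y :: rest).getD k 0 * (y :: rest).getD (k + 1) 0
          if m < cp ∧ cp ≤ z then cp else m) _
        (by intro acc k _; simp)]
      rw [ih]
      simp [pairFold]

-- the pyRange/pyGetD form of A's index loop is that Nat fold
theorem foldA_eq_foldNat (z : Int) (xs : List Int) (m : Int) :
    (PySem.List.pyRange 0 ((xs.length : Int) - 1)).foldl
      (fun m i =>
        let cp := PySem.List.pyGetD xs i 0 * PySem.List.pyGetD xs (i + 1) 0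
        if m < cp ∧ cp ≤ z then cp else m) m
    = (List.range (xs.length - 1)).foldl
      (fun m k =>
        let cp := xs.getD k 0 * xs.getD (k + 1) 0
        if m < cp ∧ cp ≤ z then cp else m) m := by
  rw [PySem.List.pyRange_one, List.foldl_map,
    show (((xs.length : Int) - 1) - 0).toNat = xs.length - 1 by omega]
  apply PySem.List.foldl_congr_mem
  intro acc k _
  have e : (k : Int) + 1 = ((k + 1 : Nat) : Int) := by push_cast; ring
  simp only [zero_add, e, PySem.List.pyGetD_natCast]


-- ---------- B-side spec helpers: adjacent products, first-from-the-end find ----------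

def adjP : List Int → List Int
  | x :: y :: rest => x * y :: adjP (y :: rest)
  | _ => []

def ffind (z : Int) : List Int → Int
  | [] => -1
  | q :: qs => if q ≤ z then q else ffind z qs

-- pairFold is a running max over the adjacent products that fit under z
theorem pairFold_eq_maxFold (z : Int) (xs : List Int) (m : Int) :
    pairFold z xs m = (adjP xs).foldl (fun m q => if q ≤ z then max m q else m) m := by
  induction xs generalizing m with
  | nil => simp [pairFold, adjP]
  | cons x xs ih =>
    cases xs with
    | nil => simp [pairFold, adjP]
    | cons y rest =>
      simp only [pairFold, adjP, List.foldl_cons]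
      rw [ih]
      congr 1
      split_ifs <;> omega

-- a max-if fold's result is the seed or an element of the list
theorem maxFold_mem (z : Int) (qs : List Int) (m : Int) :
    qs.foldl (fun m q => if q ≤ z then max m q else m) m = m ∨
    qs.foldl (fun m q => if q ≤ z then max m q else m) m ∈ qs := by
  induction qs generalizing m with
  | nil => simp
  | cons q qs ih =>
    simp only [List.foldl_cons]
    rcases ih (if q ≤ z then max m q else m) with h | h
    · rw [h]
      split_ifs with hq
      · rcases max_choice m q with e | e <;> rw [e]
        · left; rfl
        · right; simp
      · left; rfl
    · right; simp [h]

-- on a sorted nonnegative list, the running max of elements ≤ z is the last such element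
theorem maxFold_sorted_eq_ffind_reverse (z : Int) (qs : List Int)
    (hs : qs.Pairwise (· ≤ ·)) (hn : ∀ q ∈ qs, 0 ≤ q) :
    qs.foldl (fun m q => if q ≤ z then max m q else m) (-1) = ffind z qs.reverse := by
  induction qs using List.reverseRecOn with
  | nil => simp [ffind]
  | append_singleton qs q ih =>
    rw [List.foldl_append, List.reverse_append]
    simp only [List.foldl_cons, List.foldl_nil, List.reverse_singleton,
      List.singleton_append, ffind]
    have hpw := List.pairwise_append.1 hs
    split_ifs with hq
    · have hle : ∀ x ∈ qs, x ≤ q := fun x hx => hpw.2.2 x hx q (by simp)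
      have h0 : (0:Int) ≤ q := hn q (by simp)
      rcases maxFold_mem z qs (-1) with h | h
      · rw [h]; omega
      · have := hle _ h; omega
    · exact ih hpw.1 (fun x hx => hn x (by simp [hx]))

-- the k-th adjacent product
theorem adjP_getD (xs : List Int) (k : Nat) (hk : k < (adjP xs).length) :
    (adjP xs).getD k 0 = xs.getD k 0 * xs.getD (k + 1) 0 := by
  induction xs generalizing k with
  | nil => simp [adjP] at hk
  | cons x xs ih =>
    cases xs with
    | nil => simp [adjP] at hk
    | cons y rest =>
      cases k with
      | zero => simp [adjP]
      | succ j =>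
        simp only [adjP, List.length_cons] at hk ⊢
        simp only [List.getD_cons_succ]
        exact ih j (by omega)

theorem adjP_length (xs : List Int) : (adjP xs).length = xs.length - 1 := by
  induction xs with
  | nil => simp [adjP]
  | cons x xs ih =>
    cases xs with
    | nil => simp [adjP]
    | cons y rest => simp only [adjP, List.length_cons] at ih ⊢; omega

-- B's backward early-exit loop is ffind on the reversed product prefix
theorem backScan_eq_ffind (z : Int) (xs : List Int) (n : Nat) (hn : n ≤ (adjP xs).length) :
    backScan z xs n = ffind z ((adjP xs).take n).reverse := by
  induction n with
  | zero => simp [backScan, ffind]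
  | succ j ih =>
    have hj : j < (adjP xs).length := by omega
    have ht : (adjP xs).take (j+1) = (adjP xs).take j ++ [(adjP xs).getD j 0] := by
      rw [List.take_add_one]
      congr 1
      simp [List.getElem?_eq_getElem hj, List.getD]
    rw [ht, List.reverse_append]
    simp only [List.reverse_singleton, List.singleton_append, ffind]
    have hgd : (adjP xs).getD j 0 = xs.getD j 0 * xs.getD (j+1) 0 := adjP_getD xs j hj
    have e1 : PySem.List.pyGetD xs (j : Int) 0 = xs.getD j 0 := PySem.List.pyGetD_natCast xs j 0
    have e2 : PySem.List.pyGetD xs ((j : Int) + 1) 0 = xs.getD (j+1) 0 := by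
      rw [show ((j:Int) + 1) = ((j+1 : Nat) : Int) by push_cast; ring]
      exact PySem.List.pyGetD_natCast xs (j+1) 0
    simp only [backScan, e1, e2, ← hgd]
    split_ifs with h
    · rfl
    · exact ih (by omega)

-- products of adjacent elements of a strictly increasing list of elements ≥ 2 are sorted
theorem adjP_pairwise (xs : List Int) (hs : xs.Pairwise (· < ·)) (h2 : ∀ x ∈ xs, 2 ≤ x) :
    (adjP xs).Pairwise (· ≤ ·) := by
  have hc : ∀ ys : List Int, ys.Pairwise (· < ·) → (∀ x ∈ ys, 2 ≤ x) →
      (adjP ys).IsChain (· ≤ ·) := by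
    intro ys
    induction ys with
    | nil => intro _ _; simp [adjP]
    | cons x xs ih =>
      intro hp h2'
      cases xs with
      | nil => exact List.isChain_nil
      | cons y rest =>
        cases rest with
        | nil => exact List.isChain_singleton _
        | cons w r =>
          have hxy : x < y := (List.pairwise_cons.1 hp).1 y (by simp)
          have hyw : y < w := (List.pairwise_cons.1 (List.pairwise_cons.1 hp).2).1 w (by simp)
          have h2y : 2 ≤ y := h2' y (by simp)
          have htail : (adjP (y :: w :: r)).IsChain (· ≤ ·) :=
            ih (List.pairwise_cons.1 hp).2 (fun a ha => h2' a (List.mem_cons_of_mem x ha))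
          show (x * y :: adjP (y :: w :: r)).IsChain (· ≤ ·)
          rw [List.isChain_cons]
          refine ⟨?_, htail⟩
          intro q hq
          have : q = y * w := by
            simp only [adjP, List.head?_cons, Option.mem_def, Option.some.injEq] at hq
            exact hq.symm
          subst this
          nlinarith
  exact List.isChain_iff_pairwise.1 (hc xs hs h2)

theorem adjP_nonneg (xs : List Int) (h2 : ∀ x ∈ xs, 2 ≤ x) : ∀ q ∈ adjP xs, 0 ≤ q := by
  intro q hq
  induction xs with
  | nil => simp [adjP] at hq
  | cons x xs ih =>
    cases xs with
    | nil => simp [adjP] at hq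
    | cons y rest =>
      simp only [adjP, List.mem_cons] at hq
      rcases hq with rfl | hq
      · have := h2 x (by simp); have := h2 y (by simp); nlinarith
      · exact ih (fun a ha => h2 a (by simp [ha])) (by simpa [adjP] using hq)

-- M4: the two pair scans agree on a sorted list of elements ≥ 2
theorem pairFold_eq_backScan (z : Int) (xs : List Int)
    (hs : xs.Pairwise (· < ·)) (h2 : ∀ x ∈ xs, 2 ≤ x) :
    pairFold z xs (-1) = backScan z xs (xs.length - 1) := by
  rw [pairFold_eq_maxFold,
    maxFold_sorted_eq_ffind_reverse z _ (adjP_pairwise xs hs h2) (adjP_nonneg xs h2),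
    show ffind z (adjP xs).reverse = backScan z xs ((adjP xs).length) from by
      rw [backScan_eq_ffind z xs ((adjP xs).length) le_rfl, List.take_length]]
  rw [adjP_length]

-- ---------- primality: trial division = "no divisor d with d*d ≤ n" ----------

theorem isPrimeLoop_iff (n i : Int) (hn : ¬ (2:Int) ∣ n) (hodd : i % 2 = 1) (hi3 : 3 ≤ i) :
    isPrimeLoop n i = true ↔ ∀ d, i ≤ d → d * d ≤ n → ¬ d ∣ n := by
  revert hodd hi3
  induction i using isPrimeLoop.induct (num := n) with
  | case1 i hle hmod =>
    intro hodd hi3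
    rw [isPrimeLoop, dif_pos hle, if_pos hmod]
    have hdvd : i ∣ n := (PySem.Int.mod_eq_zero_iff_dvd n i).1 (by simpa using hmod)
    simp only [Bool.false_eq_true, false_iff]
    intro hP
    exact hP i le_rfl hle hdvd
  | case2 i hle hmod ih =>
    intro hodd hi3
    rw [isPrimeLoop, dif_pos hle, if_neg hmod]
    rw [ih (by omega) (by omega)]
    constructor
    · intro h d hd hdd hddvd
      by_cases hge : i + 2 ≤ d
      · exact h d hge hdd hddvd
      · by_cases hdi : d = i
        · subst hdi
          exact hmod (by simpa using (PySem.Int.mod_eq_zero_iff_dvd n d).2 hddvd)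
        · have : d = i + 1 := by omega
          subst this
          have h2d : (2:Int) ∣ (i + 1) := by omega
          exact hn (dvd_trans h2d hddvd)
    · intro h d hd hdd hddvd
      exact h d (by omega) hdd hddvd
  | case3 i hle =>
    intro hodd hi3
    rw [isPrimeLoop, dif_neg hle]
    simp only [true_iff]
    intro d hd hdd hddvd
    have : i * i ≤ d * d := mul_le_mul hd hd (by omega) (by omega)
    omega

theorem isPrimeNumber_iff (n : Int) (h2 : 2 ≤ n) :
    isPrimeNumber n = true ↔ ∀ d, 2 ≤ d → d * d ≤ n → ¬ d ∣ n := by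
  unfold isPrimeNumber
  by_cases hn2 : n = 2
  · subst hn2
    simp only [beq_self_eq_true, if_pos, true_iff]
    intro d hd hdd _
    nlinarith
  · rw [if_neg (by simpa using hn2)]
    by_cases hev : (2:Int) ∣ n
    · have hm0 : PySem.Int.mod n 2 = 0 := (PySem.Int.mod_eq_zero_iff_dvd n 2).2 hev
      rw [if_pos (by simp; exact Or.inl hev)]
      simp only [Bool.false_eq_true, false_iff]
      intro hP
      have h4 : 2 * 2 ≤ n := by
        rcases hev with ⟨t, rfl⟩
        omega
      exact hP 2 le_rfl h4 hev
    · have hmodne : ¬ (PySem.Int.mod n 2 == 0 || decide (n < 2)) = true := by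
        simp only [Bool.or_eq_true, beq_iff_eq, decide_eq_true_eq, not_or]
        exact ⟨fun h => hev ((PySem.Int.mod_eq_zero_iff_dvd n 2).1 h), by omega⟩
      rw [if_neg hmodne, isPrimeLoop_iff n 3 hev (by norm_num) le_rfl]
      constructor
      · intro h d hd hdd hddvd
        by_cases hd2 : d = 2
        · exact hev (hd2 ▸ hddvd)
        · exact h d (by omega) hdd hddvd
      · intro h d hd hdd hddvd
        exact h d (by omega) hdd hddvd

-- ---------- sieve correctness ----------

-- crossing out a list of in-window multiples: an index survives iff untouched
theorem foldSet_getD (lo : Int) (k : Nat) (ms : List Int) (flags : List Bool)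
    (hm : ∀ m ∈ ms, lo ≤ m) :
    ((ms.foldl (fun a m => PySem.List.pySetD a (m - lo) false) flags).getD k false = true ↔
      flags.getD k false = true ∧ ∀ m ∈ ms, m ≠ lo + k) := by
  induction ms generalizing flags with
  | nil => simp
  | cons m0 ms ih =>
    have hm0 : lo ≤ m0 := hm m0 (by simp)
    simp only [List.foldl_cons]
    rw [PySem.List.pySetD_of_nonneg flags false (by omega)]
    rw [ih _ (fun m hmem => hm m (by simp [hmem]))]
    have hset : (flags.set (m0 - lo).toNat false).getD k false
        = if (m0 - lo).toNat = k then false else flags.getD k false := by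
      by_cases hjk : (m0 - lo).toNat = k
      · subst hjk
        rw [if_pos rfl]
        by_cases hlen : (m0 - lo).toNat < flags.length
        · simp [List.getD, List.getElem?_set_self hlen]
        · rw [List.getD_eq_default _ _ (by simpa [List.length_set] using le_of_not_gt hlen)]
      · rw [if_neg hjk]
        simp [List.getD, List.getElem?_set_ne hjk]
    rw [hset]
    by_cases hjk : (m0 - lo).toNat = k
    · rw [if_pos hjk]
      have hm0k : m0 = lo + (k : Int) := by omega
      simp [hm0k]
    · rw [if_neg hjk]
      constructor
      · rintro ⟨h1, h2⟩
        refine ⟨h1, ?_⟩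
        intro m hmem
        rcases List.mem_cons.1 hmem with rfl | hm2
        · intro he; omega
        · exact h2 m hm2
      · rintro ⟨h1, h2⟩
        exact ⟨h1, fun m hmem => h2 m (List.mem_cons_of_mem _ hmem)⟩

-- membership in the inner marking range: exactly the in-window multiples m of d with d*d ≤ m
theorem mem_markRange (lo hi d n : Int) (hd : 2 ≤ d)
    (hn1 : lo ≤ n) (hn2 : n < hi) :
    (n ∈ PySem.List.pyRange (max (d * d) (-(PySem.Int.floordiv (-lo) d) * d)) hi d) ↔
      (d ∣ n ∧ d * d ≤ n) := by
  have hdpos : (0:Int) < d := by omega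
  set q : Int := -PySem.Int.floordiv (-lo) d with hq
  have hqb : (q - 1) * d < lo ∧ lo ≤ q * d :=
    (PySem.Int.neg_floordiv_neg_eq_iff_of_pos hdpos).1 rfl
  rw [PySem.List.mem_pyRange_iff_of_pos hdpos]
  constructor
  · rintro ⟨h1, h2, h3⟩
    have hds : d ∣ max (d * d) (q * d) := by
      rcases max_choice (d * d) (q * d) with e | e <;> rw [e]
      · exact ⟨d, rfl⟩
      · exact ⟨q, mul_comm q d⟩
    have : d ∣ n := by
      have := dvd_add h3 hds
      simpa using this
    exact ⟨this, le_trans (le_max_left _ _) h1⟩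
  · rintro ⟨⟨t, rfl⟩, h2⟩
    refine ⟨?_, hn2, ?_⟩
    · rw [max_le_iff]
      refine ⟨h2, ?_⟩
      have ht : q - 1 < t := by nlinarith [hqb.1, hn1]
      nlinarith
    · have hds : d ∣ max (d * d) (q * d) := by
        rcases max_choice (d * d) (q * d) with e | e <;> rw [e]
        · exact ⟨d, rfl⟩
        · exact ⟨q, mul_comm q d⟩
      exact dvd_sub ⟨t, by ring⟩ hds

-- the while-loop characterization
theorem sieveLoop_getD (lo hi : Int) (k : Nat) (_hlo : 0 ≤ lo) (hk : lo + k < hi) :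
    ∀ (d0 : Int) (flags : List Bool), 2 ≤ d0 →
    ((sieveLoop lo hi d0 flags).getD k false = true ↔
      flags.getD k false = true ∧
        ∀ d, d0 ≤ d → d * d < hi → d ∣ (lo + k) → ¬ d * d ≤ lo + k) := by
  intro d0 flags hd0
  induction d0, flags using sieveLoop.induct (lo := lo) (hi := hi) with
  | case1 d flags hlt ih =>
    rw [sieveLoop, dif_pos hlt]
    simp only [markMultiples] at ih ⊢
    rw [ih (by omega)]
    rw [foldSet_getD lo k _ flags (by
      intro m hmem
      have := (PySem.List.mem_pyRange_iff_of_pos (by omega) m).1 hmem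
      have : max (d * d) (-PySem.Int.floordiv (-lo) d * d) ≤ m := this.1
      have hqb := (PySem.Int.neg_floordiv_neg_eq_iff_of_pos (b := d) (a := lo) (by omega)).1 rfl
      calc lo ≤ -PySem.Int.floordiv (-lo) d * d := hqb.2
        _ ≤ max (d * d) (-PySem.Int.floordiv (-lo) d * d) := le_max_right _ _
        _ ≤ m := this)]
    constructor
    · rintro ⟨⟨h1, h2⟩, h3⟩
      refine ⟨h1, ?_⟩
      intro e he1 he2 he3 he4
      by_cases hed : e = d
      · subst hed
        exact h2 (lo + k) ((mem_markRange lo hi e (lo + k) (by omega) (by omega) hk).2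
          ⟨he3, he4⟩) rfl
      · exact h3 e (by omega) he2 he3 he4
    · rintro ⟨h1, h2⟩
      refine ⟨⟨h1, ?_⟩, ?_⟩
      · intro m hmem he
        subst he
        have := (mem_markRange lo hi d (lo + k) (by omega) (by omega) hk).1 hmem
        exact h2 d le_rfl hlt this.1 this.2
      · intro e he1 he2 he3 he4
        exact h2 e (by omega) he2 he3 he4
  | case2 d flags hlt =>
    rw [sieveLoop, dif_neg hlt]
    constructor
    · intro h1
      refine ⟨h1, ?_⟩
      intro e he1 he2 _ _
      have h0 : 0 ≤ d := by omega
      have : d * d ≤ e * e := mul_le_mul he1 he1 h0 (by omega)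
      omega
    · exact fun h => h.1

-- M3: the sieve computes exactly A's primality test on the window
theorem sieve_eq_isPrime (lo hi : Int) (k : Nat) (h2 : 2 ≤ lo) (hk : lo + k < hi) :
    (sieveLoop lo hi 2 (List.replicate (hi - lo).toNat true)).getD k false
      = isPrimeNumber (lo + k) := by
  have hn2 : 2 ≤ lo + k := by omega
  have hiff := sieveLoop_getD lo hi k (by omega) hk 2 (List.replicate (hi - lo).toNat true)
    le_rfl
  have hrep : (List.replicate (hi - lo).toNat true).getD k false = true := by
    have hklen : k < (hi - lo).toNat := by omega
    simp [List.getD, hklen]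
  have hprime := isPrimeNumber_iff (lo + k) hn2
  by_cases hp : isPrimeNumber (lo + k) = true
  · rw [hp]
    rw [hiff]
    refine ⟨hrep, ?_⟩
    intro d hd1 _ hd3 hd4
    exact (hprime.1 hp) d hd1 hd4 hd3
  · rw [Bool.not_eq_true] at hp
    rw [hp]
    rw [Bool.eq_false_iff]
    intro hcon
    have := (hiff.1 hcon).2
    have : ∀ d, 2 ≤ d → d * d ≤ lo + k → ¬ d ∣ (lo + k) := by
      intro d hd1 hd2 hd3
      exact this d hd1 (by omega) hd3 hd2
    exact absurd (hprime.2 this) (by simp [hp])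

-- ---------- assembling the prime lists ----------

theorem primes_eq (a : Int) (ha : 0 ≤ a) :
    (PySem.List.pyRange (a - 50) (a + 50) 1).filter (fun i => decide (1 < i) && isPrimeNumber i)
      = ((PySem.List.pyRange 0 ((a + 50) - max (a - 50) 2) 1).filter
          (fun k => PySem.List.pyGetD
            (sieveLoop (max (a - 50) 2) (a + 50) 2
              (List.replicate (((a + 50) - max (a - 50) 2)).toNat true)) k false)).map
          (fun k => max (a - 50) 2 + k) := by
  have h1 : a - 50 ≤ max (a - 50) 2 := le_max_left _ _
  have h2 : max (a - 50) 2 ≤ a + 50 := max_le (by omega) (by omega)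
  rw [PySem.List.pyRange_one_append (a - 50) (max (a - 50) 2) (a + 50) h1 h2,
    List.filter_append]
  have hnil : (PySem.List.pyRange (a - 50) (max (a - 50) 2) 1).filter
      (fun i => decide (1 < i) && isPrimeNumber i) = [] := by
    rw [List.filter_eq_nil_iff]
    intro i hi
    have := PySem.List.mem_pyRange_one.1 hi
    have : ¬ (1 < i) := by omega
    simp [this]
  rw [hnil, List.nil_append]
  rw [PySem.List.pyRange_one (max (a - 50) 2) (a + 50),
    PySem.List.pyRange_one 0 (a + 50 - max (a - 50) 2)]
  rw [List.filter_map, List.filter_map]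
  rw [show (a + 50 - max (a - 50) 2 - 0).toNat = (a + 50 - max (a - 50) 2).toNat by omega]
  have hfun : ((fun k => max (a - 50) 2 + k) ∘ fun k : Nat => (0:Int) + ↑k)
      = fun k : Nat => max (a - 50) 2 + (k : Int) := by
    funext k; simp
  rw [List.map_map, hfun]
  have hfilt : (List.range (a + 50 - max (a - 50) 2).toNat).filter
        ((fun i => decide (1 < i) && isPrimeNumber i) ∘ fun k : Nat => max (a - 50) 2 + ↑k)
      = (List.range (a + 50 - max (a - 50) 2).toNat).filter
        ((fun k => PySem.List.pyGetD
            (sieveLoop (max (a - 50) 2) (a + 50) 2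
              (List.replicate (a + 50 - max (a - 50) 2).toNat true)) k false)
          ∘ fun k : Nat => (0:Int) + ↑k) := by
    apply List.filter_congr
    intro k hk
    have hkN : k < (a + 50 - max (a - 50) 2).toNat := List.mem_range.1 hk
    have hlo2 : 2 ≤ max (a - 50) 2 := le_max_right _ _
    have hkhi : max (a - 50) 2 + (k : Int) < a + 50 := by omega
    simp only [Function.comp_apply, zero_add, PySem.List.pyGetD_natCast]
    rw [sieve_eq_isPrime (max (a - 50) 2) (a + 50) k hlo2 hkhi]
    have : (1:Int) < max (a - 50) 2 + (k : Int) := by omega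
    simp [this]
  rw [hfilt]

-- ===== VERDICT (by name: the statement is the Claim_ definition above) =====
theorem ConsecutivePrimes_spec : Claim_equal_ConsecutivePrimes := by
  intro z _ hz
  show ConsecutivePrimes z = ConsecutivePrimes_alt z
  simp only [ConsecutivePrimes, ConsecutivePrimes_alt]
  rw [PySem.List.foldl_append_if_eq_filter]
  simp only [List.nil_append]
  rw [foldA_eq_foldNat, foldNat_eq_pairFold, primes_eq (Int.sqrt z) (Int.sqrt_nonneg z)]
  apply pairFold_eq_backScan
  · rw [List.pairwise_map]
    exact (PySem.List.pairwise_lt_pyRange_one 0 _ |>.filter _).imp (by omega)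
  · intro x hx
    rw [List.mem_map] at hx
    obtain ⟨k, hk, rfl⟩ := hx
    have := PySem.List.mem_pyRange_one.1 (List.mem_of_mem_filter hk)
    omega
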